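-- pv_equiv track=rewrite | github.com/Lighting-Ari/BooTdotDEV | Python/Training/T2/main.py | build_number_ladder
-- ===== SOURCE A (Python) =====
-- def build_number_ladder(height):
--     ladder = ""
--
--
--     for row in range(1, height +1):
--         for number in range(1, row + 1):
--             ladder += str(number)
--         if row < height :
--             ladder += "\n"
--
--     return ladder
-- ===== SOURCE B (Python) =====
-- def build_number_ladder(height):
--     rows = []
--     cur = ""
--     for r in range(1, height + 1):
--         cur += str(r)
--         rows.append(cur)
--     return "\n".join(rows)
-- ===== Notes on version B (the rewrite author's own statement) =====
-- stated objective: alternative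
-- what changed: B replaces A's nested loops (each row regenerated number-by-number from 1, with a row<height newline test) by a single pass that extends one accumulator string by str(r) per row, collects the prefix rows in a list, and joins them with '\n'.
import Mathlib
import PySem

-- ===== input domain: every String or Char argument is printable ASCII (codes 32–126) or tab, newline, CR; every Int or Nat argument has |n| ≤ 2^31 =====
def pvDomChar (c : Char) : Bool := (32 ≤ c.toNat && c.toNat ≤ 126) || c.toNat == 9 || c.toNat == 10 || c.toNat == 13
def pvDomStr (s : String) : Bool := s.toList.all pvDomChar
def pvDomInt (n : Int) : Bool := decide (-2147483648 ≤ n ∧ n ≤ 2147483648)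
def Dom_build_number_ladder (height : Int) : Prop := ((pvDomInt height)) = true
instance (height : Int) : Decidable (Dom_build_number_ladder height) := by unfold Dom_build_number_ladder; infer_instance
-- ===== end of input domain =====

-- B builds the ladder in one pass: each row extends the previous row's string by one
-- number (no inner per-row loop, no row<height test), and the rows are joined with newlines.

-- ===== PORT A =====
def build_number_ladder (height : Int) : String :=
  (PySem.List.pyRange 1 (height + 1)).foldl
    (fun ladder row =>
      let ladder := (PySem.List.pyRange 1 (row + 1)).foldl
        (fun l number => l ++ PySem.Int.toStr number) ladder
      if row < height then ladder ++ "\n" else ladder)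
    ""

-- ===== PORT B =====
def build_number_ladder_alt (height : Int) : String :=
  let st := (PySem.List.pyRange 1 (height + 1)).foldl
    (fun (st : String × List String) r =>
      let cur := st.1 ++ PySem.Int.toStr r
      (cur, st.2 ++ [cur]))
    ("", [])
  PySem.Str.join "\n" st.2

-- ===== PRECONDITION & SPEC =====
def Spec_build_number_ladder (height : Int) (out : String) : Prop := out = build_number_ladder_alt height
instance (height : Int) (out : String) : Decidable (Spec_build_number_ladder height out) := by unfold Spec_build_number_ladder; infer_instance

-- ===== CLAIM (what is proved, stated in full; the proofs are below) =====
def Claim_equal_build_number_ladder : Prop := ∀ (height : Int), Dom_build_number_ladder height → Spec_build_number_ladder height (build_number_ladder height)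

-- ===== LEMMAS AND PROOFS =====

-- the characters of row r: the digits of 1,2,…,r concatenated
def rowChars (r : Int) : List Char :=
  (PySem.List.pyRange 1 (r + 1)).flatMap PySem.Int.toChars

-- the characters produced by rows each followed by '\n'
def fullChars (L : List Int) : List Char :=
  L.flatMap (fun r => rowChars r ++ ['\n'])

-- the list of rows B collects, starting from accumulator s
def bRows (s : List Char) (L : List Int) : List (List Char) :=
  match L with
  | [] => []
  | r :: t => (s ++ PySem.Int.toChars r) :: bRows (s ++ PySem.Int.toChars r) t

theorem inner_fold_chars (L : List Int) (s : String) :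
    (L.foldl (fun l number => l ++ PySem.Int.toStr number) s).toList
      = s.toList ++ L.flatMap PySem.Int.toChars := by
  induction L generalizing s with
  | nil => simp
  | cons r t ih => simp [ih, PySem.Int.toList_toStr]

theorem bRows_snoc (L : List Int) (r : Int) (s : List Char) :
    bRows s (L ++ [r]) = bRows s L ++ [s ++ L.flatMap PySem.Int.toChars ++ PySem.Int.toChars r] := by
  induction L generalizing s with
  | nil => simp [bRows]
  | cons x t ih => simp [bRows, ih]

theorem bfold_chars (L : List Int) (s : String) (rows : List String) :
    ((L.foldl (fun (st : String × List String) r =>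
        let cur := st.1 ++ PySem.Int.toStr r
        (cur, st.2 ++ [cur])) (s, rows)).2).map String.toList
      = rows.map String.toList ++ bRows s.toList L := by
  induction L generalizing s rows with
  | nil => simp [bRows]
  | cons r t ih => simp [bRows, ih, PySem.Int.toList_toStr]

theorem join_snoc (sep x : List Char) (xs : List (List Char)) (hne : xs ≠ []) :
    PySem.Chars.join sep (xs ++ [x]) = PySem.Chars.join sep xs ++ sep ++ x := by
  induction xs with
  | nil => simp at hne
  | cons p t ih =>
    cases t with
    | nil => simp [PySem.Chars.join_cons_cons, PySem.Chars.join_singleton]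
    | cons q u =>
      simp only [List.cons_append] at ih ⊢
      rw [PySem.Chars.join_cons_cons, ih (by simp), PySem.Chars.join_cons_cons]
      simp [List.append_assoc]

theorem bRows_ne_nil (s : List Char) (L : List Int) (h : L ≠ []) : bRows s L ≠ [] := by
  cases L with
  | nil => simp at h
  | cons r t => simp [bRows]

theorem rowChars_succ (h : Int) (hh : 0 ≤ h) :
    rowChars (h + 1) = rowChars h ++ PySem.Int.toChars (h + 1) := by
  unfold rowChars
  rw [show h + 1 + 1 = (h + 1) + 1 from rfl, PySem.List.pyRange_one_succ_right (by omega)]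
  simp

-- the main induction: B's joined rows equal A's shape, for every h ≥ 1
theorem main_ind (h : Int) (hh : 1 ≤ h) :
    PySem.Chars.join ['\n'] (bRows [] (PySem.List.pyRange 1 (h + 1)))
      = fullChars (PySem.List.pyRange 1 h) ++ rowChars h := by
  induction h, hh using Int.le_induction with
  | base => decide
  | succ n hn ih =>
    rw [PySem.List.pyRange_one_succ_right (show (1:Int) ≤ n + 1 by omega),
      bRows_snoc, join_snoc _ _ _ (bRows_ne_nil _ _ (by
        rw [PySem.List.pyRange_one_cons (by omega)]; simp)),
      ih]
    have hrow : rowChars (n + 1) = rowChars n ++ PySem.Int.toChars (n + 1) :=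
      rowChars_succ n (by omega)
    rw [show (PySem.List.pyRange 1 (n + 1)) = PySem.List.pyRange 1 n ++ [n] from
      PySem.List.pyRange_one_succ_right (by omega)]
    simp [fullChars, rowChars, List.flatMap_append, List.append_assoc,
      PySem.List.pyRange_one_succ_right (show (1:Int) ≤ n by omega)]
    rw [PySem.List.pyRange_one_succ_right (show (1:Int) ≤ n + 1 by omega),
      PySem.List.pyRange_one_succ_right (show (1:Int) ≤ n by omega)]
    simp [List.flatMap_append, List.append_assoc]

-- A's fold over rows all strictly below height appends a newline after every row
theorem afold_chars (hgt : Int) (L : List Int) (hL : ∀ r ∈ L, r < hgt) (s : String) :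
    (L.foldl (fun ladder row =>
        let ladder := (PySem.List.pyRange 1 (row + 1)).foldl
          (fun l number => l ++ PySem.Int.toStr number) ladder
        if row < hgt then ladder ++ "\n" else ladder) s).toList
      = s.toList ++ fullChars L := by
  induction L generalizing s with
  | nil => simp [fullChars]
  | cons r t ih =>
    have hr : r < hgt := hL r (by simp)
    simp only [List.foldl_cons, if_pos hr]
    rw [ih (fun x hx => hL x (by simp [hx]))]
    simp [fullChars, rowChars, inner_fold_chars]

-- ===== VERDICT (by name: the statement is the Claim_ definition above) =====
theorem build_number_ladder_spec : Claim_equal_build_number_ladder := by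
  intro h _
  unfold Spec_build_number_ladder
  apply String.toList_inj.mp
  have hB : (build_number_ladder_alt h).toList
      = PySem.Chars.join ['\n'] (bRows [] (PySem.List.pyRange 1 (h + 1))) := by
    unfold build_number_ladder_alt
    rw [PySem.Str.toList_join, bfold_chars]
    rfl
  rw [hB]
  by_cases hpos : 1 ≤ h
  · rw [main_ind h hpos]
    unfold build_number_ladder
    rw [show PySem.List.pyRange 1 (h + 1) = PySem.List.pyRange 1 h ++ [h] from
      PySem.List.pyRange_one_succ_right (by omega), List.foldl_append]
    simp only [List.foldl_cons, List.foldl_nil, if_neg (lt_irrefl h)]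
    rw [inner_fold_chars, afold_chars h _ (fun r hr => (PySem.List.mem_pyRange_one.mp hr).2) ""]
    simp [rowChars]
  · unfold build_number_ladder
    rw [PySem.List.pyRange_one_eq_nil (show h + 1 ≤ 1 by omega)]
    simp [bRows, PySem.Chars.join_nil]
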